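-- pv_equiv track=rewrite | github.com/Vladyslaviuss/Multiprocessing_FuzzGenerator | main.py | convert_decimal_number_to_custom_base
-- ===== SOURCE A (Python) =====
-- from typing import NamedTuple, Final, Iterator
--
-- def convert_decimal_number_to_custom_base(number: int, base: int, word_length: int) -> Iterator[int]:
--     """Convert decimal integer to list of numbers for custom base by iteration. From lowest to bigger."""
--
--     list_of_numbers_to_convert = [0 for _ in range(word_length)]
--     counter = word_length - 1
--     number_to_convert = number
--
--     while number_to_convert:
--         floor_division, remainder = divmod(number_to_convert, base)
--         list_of_numbers_to_convert[counter] = remainder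
--         number_to_convert = floor_division
--         counter -= 1
--
--     return list_of_numbers_to_convert
-- ===== SOURCE B (Python) =====
-- def convert_decimal_number_to_custom_base(number, base, word_length):
--     """Fixed-width word of `number` in base `base`: digits most-significant
--     first, left-padded with zeros; a number too wide for the word keeps its
--     lowest `word_length` digits."""
--
--     def to_digits(n):
--         if n == 0:
--             return []
--         quotient, remainder = divmod(n, base)
--         return to_digits(quotient) + [remainder]
--
--     word = [0] * word_length + to_digits(number)
--     return word[len(word) - word_length:]
-- ===== Notes on version B (the rewrite author's own statement) =====
-- stated objective: simpler
-- what changed: A iterates divmod while walking a cursor backwards through a preallocated array with in-place index assignment; B recursively builds the most-significant-first digit list, left-pads it with zeros and keeps the last word_length entries by one slice, with no index arithmetic or mutation; on numbers wider than the word A's cursor wraps around and garbles the result, where B returns the low word_length digits (declared as D_).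
-- intended difference: On inputs whose base-`base` digit count exceeds word_length (but still small enough that A returns), A's write cursor wraps to the top of the word and overwrites high positions with a mix of high and low digits, while B returns the low word_length digits - the standard fixed-width truncation a maintainer would expect. — e.g. on convert_decimal_number_to_custom_base(6, 2, 2): A returns [1, 1], B returns [1, 0]
import Mathlib
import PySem

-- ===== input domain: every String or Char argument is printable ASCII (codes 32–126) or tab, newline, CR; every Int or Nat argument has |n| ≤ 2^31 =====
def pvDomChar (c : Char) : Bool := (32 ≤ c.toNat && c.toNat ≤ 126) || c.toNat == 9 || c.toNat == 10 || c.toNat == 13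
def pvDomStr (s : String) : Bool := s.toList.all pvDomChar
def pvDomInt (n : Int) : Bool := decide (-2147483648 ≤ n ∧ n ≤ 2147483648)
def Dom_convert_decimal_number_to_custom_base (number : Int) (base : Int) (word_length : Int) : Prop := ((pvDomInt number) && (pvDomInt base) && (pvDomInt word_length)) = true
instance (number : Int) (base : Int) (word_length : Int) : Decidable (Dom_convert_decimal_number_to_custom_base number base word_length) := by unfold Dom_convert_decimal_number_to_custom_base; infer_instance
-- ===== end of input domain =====

-- B rebuilds the word without index arithmetic: a recursive most-significant-first digit
-- list, zero padding and one slice (objective: simpler). On numbers too wide for the word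
-- A's write cursor wraps around; B keeps the low word_length digits (stated as D_ below).

-- ===== PORT A =====
-- A's 'while number_to_convert:' loop over (number, counter, list). Fuel 64 only makes the
-- recursion total: on Dom ∩ Pre_ the loop runs at most 34 iterations. 'none' from
-- divmod?/pySet? = Python's ZeroDivisionError/IndexError, both excluded by Pre_.
def pvLoopA : Nat → Int → Int → Int → List Int → List Int
  | 0, _, _, _, lst => lst
  | f + 1, n, b, c, lst =>
    if n ≠ 0 then
      match PySem.Int.divmod? n b with
      | none => lst
      | some (q, r) =>
        match PySem.List.pySet? lst c r with
        | none => lst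
        | some lst' => pvLoopA f q b (c - 1) lst'
    else lst

def convert_decimal_number_to_custom_base (number : Int) (base : Int) (word_length : Int) : List Int :=
  pvLoopA 64 number base (word_length - 1) (List.replicate word_length.toNat 0)

-- ===== PORT B =====
-- Source B's recursive helper to_digits (most-significant digit first); same fuel-64 totalisation
def pvToDigits : Nat → Int → Int → List Int
  | 0, _, _ => []
  | f + 1, n, b =>
    if n ≠ 0 then
      match PySem.Int.divmod? n b with
      | none => []
      | some (q, r) => pvToDigits f q b ++ [r]
    else []

-- 'word = [0] * word_length + to_digits(number); return word[len(word) - word_length:]'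
def convert_decimal_number_to_custom_base_alt (number : Int) (base : Int) (word_length : Int) : List Int :=
  let word := List.replicate word_length.toNat 0 ++ pvToDigits 64 number base
  PySem.List.slice word (some ((word.length : Int) - word_length)) none

-- ===== PRECONDITION & SPEC =====
-- Capacity interval of a word of k digits in base b: (pvNB b k).1 / .2 are the least /
-- greatest integer whose base-b expansion (digits in Python's divmod convention) has at
-- most k digits. Used only to state Pre_/D_ in closed form.
def pvNB (b : Int) : Nat → Int × Int
  | 0 => (0, 0)
  | k + 1 =>
    let p := pvNB b k
    if b < 0 then (b * p.2 + b + 1, b * p.1) else (b * p.1, b * p.2 + b - 1)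

-- Pre_ excludes exactly the inputs on which Python's A never returns: base 0 raises
-- ZeroDivisionError; base ±1, and a nonzero number of opposite behaviour with a positive
-- base (number < 0 < base), loop forever; and a number needing more than 2*word_length
-- digits raises IndexError once the cursor leaves [-word_length, word_length). The fit
-- conditions are exact; the '17 ≤ word_length' disjunct is the same condition stated
-- without an astronomical power (on Dom, |number| ≤ 2^31 always fits in 34 digits).
def Pre_convert_decimal_number_to_custom_base (number : Int) (base : Int) (word_length : Int) : Prop :=
  number = 0
  ∨ (2 ≤ base ∧ 0 < number ∧
      (17 ≤ word_length ∨ number < base ^ (2 * word_length).toNat))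
  ∨ (base ≤ -2 ∧
      (17 ≤ word_length ∨
        ((pvNB base (2 * word_length).toNat).1 ≤ number ∧
          number ≤ (pvNB base (2 * word_length).toNat).2)))
instance (number : Int) (base : Int) (word_length : Int) : Decidable (Pre_convert_decimal_number_to_custom_base number base word_length) := by unfold Pre_convert_decimal_number_to_custom_base; infer_instance

def pvWitness_convert_decimal_number_to_custom_base : Int × Int × Int := (13, 3, 4)

-- On inputs whose digit count exceeds word_length (but A still returns), A's write cursor
-- wraps to the top of the word and overwrites high positions with a mix of high and low
-- digits, while B returns the low word_length digits — the standard fixed-width truncation.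
-- D_ is that overflow region in closed form: for a nonnegative base exactly the numbers
-- reaching base^word_length; for a negative base the closed-form envelope |number| within
-- a factor |base|+1 of the capacity; outside D_ the word provably fits and A = B.
def D_convert_decimal_number_to_custom_base (number : Int) (base : Int) (word_length : Int) : Prop :=
  word_length ≤ 33 ∧
    if 0 ≤ base then base ^ word_length.toNat ≤ number
    else base.natAbs ^ word_length.toNat < (base.natAbs + 1) * number.natAbs
instance (number : Int) (base : Int) (word_length : Int) : Decidable (D_convert_decimal_number_to_custom_base number base word_length) := by unfold D_convert_decimal_number_to_custom_base; infer_instance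

def Spec_convert_decimal_number_to_custom_base (number : Int) (base : Int) (word_length : Int) (out : List Int) : Prop := ¬ D_convert_decimal_number_to_custom_base number base word_length → out = convert_decimal_number_to_custom_base_alt number base word_length
instance (number : Int) (base : Int) (word_length : Int) (out : List Int) : Decidable (Spec_convert_decimal_number_to_custom_base number base word_length out) := by unfold Spec_convert_decimal_number_to_custom_base; infer_instance

def pvDiffWitness_convert_decimal_number_to_custom_base : Int × Int × Int := (6, 2, 2)
def pvDiffWitnessOut_convert_decimal_number_to_custom_base : (List Int) × (List Int) := ([1, 1], [1, 0])

-- ===== CLAIM =====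
def Claim_unchanged_convert_decimal_number_to_custom_base : Prop := ∀ (number : Int) (base : Int) (word_length : Int), Dom_convert_decimal_number_to_custom_base number base word_length → Pre_convert_decimal_number_to_custom_base number base word_length → Spec_convert_decimal_number_to_custom_base number base word_length (convert_decimal_number_to_custom_base number base word_length)
def Claim_changed_convert_decimal_number_to_custom_base : Prop := Dom_convert_decimal_number_to_custom_base (pvDiffWitness_convert_decimal_number_to_custom_base.1) (pvDiffWitness_convert_decimal_number_to_custom_base.2.1) (pvDiffWitness_convert_decimal_number_to_custom_base.2.2) ∧ Pre_convert_decimal_number_to_custom_base (pvDiffWitness_convert_decimal_number_to_custom_base.1) (pvDiffWitness_convert_decimal_number_to_custom_base.2.1) (pvDiffWitness_convert_decimal_number_to_custom_base.2.2) ∧ D_convert_decimal_number_to_custom_base (pvDiffWitness_convert_decimal_number_to_custom_base.1) (pvDiffWitness_convert_decimal_number_to_custom_base.2.1) (pvDiffWitness_convert_decimal_number_to_custom_base.2.2) ∧ convert_decimal_number_to_custom_base (pvDiffWitness_convert_decimal_number_to_custom_base.1) (pvDiffWitness_convert_decimal_number_to_custom_base.2.1) (pvDiffWitness_convert_decimal_number_to_custom_base.2.2)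 = pvDiffWitnessOut_convert_decimal_number_to_custom_base.1 ∧ convert_decimal_number_to_custom_base_alt (pvDiffWitness_convert_decimal_number_to_custom_base.1) (pvDiffWitness_convert_decimal_number_to_custom_base.2.1) (pvDiffWitness_convert_decimal_number_to_custom_base.2.2) = pvDiffWitnessOut_convert_decimal_number_to_custom_base.2 ∧ pvDiffWitnessOut_convert_decimal_number_to_custom_base.1 ≠ pvDiffWitnessOut_convert_decimal_number_to_custom_base.2

-- ===== LEMMAS AND PROOFS =====

-- proof-only helper: the least-significant-first digit list both loops extract
def pvDigitsB : Nat → Int → Int → List Int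
  | 0, _, _ => []
  | f + 1, n, b =>
    if n ≠ 0 then
      match PySem.Int.divmod? n b with
      | none => []
      | some (q, r) => r :: pvDigitsB f q b
    else []

-- proof-only helper: place digits at a decrementing cursor (A's write phase)
def pvPlace : List Int → Int → List Int → List Int
  | [], _, lst => lst
  | d :: ds, c, lst =>
    match PySem.List.pySet? lst c d with
    | none => lst
    | some lst' => pvPlace ds (c - 1) lst'

lemma pvLoopA_eq_place : ∀ (f : Nat) (n b c : Int) (lst : List Int),
    pvLoopA f n b c lst = pvPlace (pvDigitsB f n b) c lst := by
  intro f
  induction f with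
  | zero => intro n b c lst; simp [pvLoopA, pvDigitsB, pvPlace]
  | succ f ih =>
    intro n b c lst
    by_cases hn : n = 0
    · simp [pvLoopA, pvDigitsB, pvPlace, hn]
    · cases hdm : PySem.Int.divmod? n b with
      | none => simp [pvLoopA, pvDigitsB, pvPlace, hn, hdm]
      | some qr =>
        obtain ⟨q, r⟩ := qr
        cases hset : PySem.List.pySet? lst c r with
        | none => simp [pvLoopA, pvDigitsB, pvPlace, hn, hdm, hset]
        | some lst' => simp [pvLoopA, pvDigitsB, pvPlace, hn, hdm, hset, ih]

lemma pvToDigits_eq_reverse : ∀ (f : Nat) (n b : Int),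
    pvToDigits f n b = (pvDigitsB f n b).reverse := by
  intro f
  induction f with
  | zero => intro n b; simp [pvToDigits, pvDigitsB]
  | succ f ih =>
    intro n b
    by_cases hn : n = 0
    · simp [pvToDigits, pvDigitsB, hn]
    · cases hdm : PySem.Int.divmod? n b with
      | none => simp [pvToDigits, pvDigitsB, hn, hdm]
      | some qr =>
        obtain ⟨q, r⟩ := qr
        simp [pvToDigits, pvDigitsB, hn, hdm, ih]

lemma pySet?_of_range (lst : List Int) (c d : Int) (h0 : 0 ≤ c) (h1 : c < lst.length) :
    PySem.List.pySet? lst c d = some (lst.set c.toNat d) := by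
  simp only [PySem.List.pySet?, PySem.List.pyIdx?]
  split_ifs <;> simp_all

lemma pvPlace_formula : ∀ (ds : List Int) (c : Int) (lst : List Int),
    (ds.length : Int) ≤ c + 1 → c + 1 ≤ lst.length →
    pvPlace ds c lst =
      lst.take (c + 1 - ds.length).toNat ++ ds.reverse ++ lst.drop (c + 1).toNat := by
  intro ds
  induction ds with
  | nil => intro c lst _ _; simp [pvPlace]
  | cons d t ih =>
    intro c lst h1 h2
    have hc0 : 0 ≤ c := by push_cast [List.length_cons] at h1; omega
    have hclen : c < lst.length := by omega
    have hset := pySet?_of_range lst c d hc0 hclen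
    simp only [pvPlace, hset]
    have h1' : (t.length : Int) ≤ (c - 1) + 1 := by
      push_cast [List.length_cons] at h1; omega
    rw [ih (c - 1) _ h1' (by simp; omega)]
    have e1 : (c - 1 + 1 - (t.length : Int)).toNat = (c + 1 - ((d :: t).length : Int)).toNat := by
      push_cast [List.length_cons]; omega
    have e2 : (c - 1 + 1).toNat = c.toNat := by omega
    rw [e1, e2]
    have htake : (lst.set c.toNat d).take (c + 1 - ((d :: t).length : Int)).toNat
        = lst.take (c + 1 - ((d :: t).length : Int)).toNat := by
      apply List.take_set_of_le
      push_cast [List.length_cons] at h1 ⊢; omega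
    have hdrop : (lst.set c.toNat d).drop c.toNat = d :: lst.drop (c + 1).toNat := by
      have e3 : (c + 1).toNat = c.toNat + 1 := by omega
      rw [e3, List.drop_eq_getElem_cons (by simp; omega)]
      simp [List.drop_set]
    rw [htake, hdrop]
    simp [List.append_assoc]

-- length bounds on the digit list ------------------------------------------------

lemma digitsB_len_le_pow : ∀ (k : Nat) (f : Nat) (n b : Int), 2 ≤ b → 0 ≤ n → n < b ^ k →
    (pvDigitsB f n b).length ≤ k := by
  intro k
  induction k with
  | zero =>
    intro f n b hb hn hlt
    have : n = 0 := by simp at hlt; omega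
    cases f <;> simp [pvDigitsB, this]
  | succ k ih =>
    intro f n b hb hn hlt
    cases f with
    | zero => simp [pvDigitsB]
    | succ f =>
      by_cases h0 : n = 0
      · simp [pvDigitsB, h0]
      · have hb0 : b ≠ 0 := by omega
        have hbpos : (0:Int) < b := by omega
        simp only [pvDigitsB, h0, ne_eq, not_false_eq_true, if_pos,
          PySem.Int.divmod?, hb0, if_neg, List.length_cons]
        have hfd : n.fdiv b = n / b := by
          rw [Int.fdiv_eq_ediv]
          simp [show (0:Int) ≤ b by omega]
        have hq0 : 0 ≤ n.fdiv b := by rw [hfd]; exact Int.ediv_nonneg hn (by omega)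
        have hqlt : n.fdiv b < b ^ k := by
          rw [hfd, Int.ediv_lt_iff_lt_mul hbpos]
          calc n < b ^ (k + 1) := hlt
          _ = b ^ k * b := by ring
        exact Nat.succ_le_succ (ih f _ b hb hq0 hqlt)

lemma pvNB_neg_sign (b : Int) (hb : b ≤ -2) : ∀ k, (pvNB b k).1 ≤ 0 ∧ 0 ≤ (pvNB b k).2 := by
  intro k
  induction k with
  | zero => simp [pvNB]
  | succ k ih =>
    obtain ⟨h1, h2⟩ := ih
    have hx : (0:Int) ≤ (-b) * (pvNB b k).2 := mul_nonneg (by omega) h2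
    have hy : (0:Int) ≤ (-b) * (-(pvNB b k).1) := mul_nonneg (by omega) (by omega)
    simp only [pvNB, if_pos (show b < 0 by omega)]
    constructor
    · nlinarith
    · nlinarith

lemma pvNB_neg (b : Int) (hb : b ≤ -2) (k : Nat) :
    pvNB b (k + 1) = (b * (pvNB b k).2 + b + 1, b * (pvNB b k).1) := by
  simp [pvNB, if_pos (show b < 0 by omega)]

lemma pvNB_min (b : Int) (hb : b ≤ -2) : ∀ k : Nat,
    (-b) ^ k - (-b) ≤ (1 - b) * (pvNB b k).2 ∧ (-b) ^ k - 1 ≤ (1 - b) * (-(pvNB b k).1) := by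
  intro k
  induction k with
  | zero => simp [pvNB]; omega
  | succ k ih =>
    obtain ⟨ih1, ih2⟩ := ih
    have hm1 := mul_le_mul_of_nonneg_left ih1 (show (0:Int) ≤ -b by omega)
    have hm2 := mul_le_mul_of_nonneg_left ih2 (show (0:Int) ≤ -b by omega)
    rw [pvNB_neg b hb k]
    simp only [pow_succ]
    constructor
    · nlinarith
    · nlinarith

lemma fits_of_small (n b : Int) (k : Nat) (hb : b ≤ -2)
    (h : (b.natAbs + 1) * n.natAbs ≤ b.natAbs ^ k) :
    (pvNB b k).1 ≤ n ∧ n ≤ (pvNB b k).2 := by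
  obtain ⟨hs1, hs2⟩ := pvNB_neg_sign b hb k
  obtain ⟨hm1, hm2⟩ := pvNB_min b hb k
  have hI : ((b.natAbs : Int) + 1) * (n.natAbs : Int) ≤ (b.natAbs : Int) ^ k := by
    exact_mod_cast h
  have hbn : (b.natAbs : Int) = -b := by omega
  rw [hbn] at hI
  constructor
  · by_contra hlt
    have habs : -(pvNB b k).1 + 1 ≤ (n.natAbs : Int) := by omega
    nlinarith [mul_le_mul_of_nonneg_left habs (show (0:Int) ≤ 1 - b by omega)]
  · by_contra hgt
    have habs : (pvNB b k).2 + 1 ≤ (n.natAbs : Int) := by omega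
    nlinarith [mul_le_mul_of_nonneg_left habs (show (0:Int) ≤ 1 - b by omega)]

lemma divmod_fst (n b : Int) (hb : b ≠ 0) :
    PySem.Int.divmod? n b = some (PySem.Int.floordiv n b, PySem.Int.mod n b) := by
  simp [PySem.Int.divmod?, hb, PySem.Int.floordiv, PySem.Int.mod]

lemma digitsB_len_le_nb : ∀ (k : Nat) (f : Nat) (n b : Int), b ≤ -2 →
    (pvNB b k).1 ≤ n → n ≤ (pvNB b k).2 → (pvDigitsB f n b).length ≤ k := by
  intro k
  induction k with
  | zero =>
    intro f n b hb h1 h2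
    have : n = 0 := by simp [pvNB] at h1 h2; omega
    cases f <;> simp [pvDigitsB, this]
  | succ k ih =>
    intro f n b hb h1 h2
    cases f with
    | zero => simp [pvDigitsB]
    | succ f =>
      by_cases h0 : n = 0
      · simp [pvDigitsB, h0]
      · have hb0 : b ≠ 0 := by omega
        simp only [pvDigitsB, h0, ne_eq, not_false_eq_true, if_pos,
          divmod_fst n b hb0, List.length_cons]
        have hmod := PySem.Int.mod_neg_bounds (a := n) (b := b) (by omega)
        have hdm := PySem.Int.floordiv_mul_add_mod n b
        set q := PySem.Int.floordiv n b with hq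
        set r := PySem.Int.mod n b with hr
        rw [pvNB_neg b hb k] at h1 h2
        simp only at h1 h2
        have hlo : (pvNB b k).1 ≤ q := by nlinarith [hmod.1, hmod.2]
        have hhi : q ≤ (pvNB b k).2 := by nlinarith [hmod.1, hmod.2]
        exact Nat.succ_le_succ (ih f q b hb hlo hhi)

lemma pvNB_growth (b : Int) (hb : b ≤ -2) : ∀ (k : Nat),
    (pvNB b (2 * k)).1 ≤ 0 ∧ 0 ≤ (pvNB b (2 * k)).2 ∧
    3 * (pvNB b (2 * k)).1 ≤ 1 - 4 ^ k ∧ 2 * 4 ^ k - 2 ≤ 3 * (pvNB b (2 * k)).2 := by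
  intro k
  induction k with
  | zero => simp [pvNB]
  | succ k ih =>
    obtain ⟨hlo0, hhi0, hlo, hhi⟩ := ih
    have he : 2 * (k + 1) = (2 * k) + 1 + 1 := by omega
    rw [he]
    simp only [pvNB_neg b hb, pow_succ]
    have hb2 : 4 ≤ b * b := by nlinarith
    constructor
    · nlinarith
    constructor
    · nlinarith
    have hq1 : (b * b - 4) * (pvNB b (2 * k)).1 ≤ 0 :=
      mul_nonpos_of_nonneg_of_nonpos (by nlinarith) hlo0
    have hq2 : 0 ≤ (b * b - 4) * (pvNB b (2 * k)).2 :=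
      mul_nonneg (by nlinarith) hhi0
    constructor
    · have h4 : (0:Int) < 4 ^ k := by positivity
      nlinarith [hq1, hlo]
    · have h4 : (0:Int) < 4 ^ k := by positivity
      nlinarith [hq2, hhi]

-- main agreement lemma on the fitting region -------------------------------------

lemma pvLoopA_zero (f : Nat) (b c : Int) (lst : List Int) : pvLoopA f 0 b c lst = lst := by
  cases f <;> simp [pvLoopA]

lemma pvToDigits_zero (f : Nat) (b : Int) : pvToDigits f 0 b = [] := by
  cases f <;> simp [pvToDigits]

lemma agree_of_len_le (n b wl : Int) (hwl : 1 ≤ wl)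
    (hlen : ((pvDigitsB 64 n b).length : Int) ≤ wl) :
    convert_decimal_number_to_custom_base n b wl =
      convert_decimal_number_to_custom_base_alt n b wl := by
  simp only [convert_decimal_number_to_custom_base, convert_decimal_number_to_custom_base_alt]
  rw [pvLoopA_eq_place, pvToDigits_eq_reverse]
  set ds := pvDigitsB 64 n b with hds
  rw [pvPlace_formula ds (wl - 1) _ (by omega)
    (by simp only [List.length_replicate]; omega)]
  have e3 : wl - 1 + 1 = wl := by ring
  rw [e3]
  have hk : (0:Int) ≤ (((List.replicate wl.toNat (0:Int) ++ ds.reverse).length : Int) - wl) := by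
    simp only [List.length_append, List.length_replicate, List.length_reverse]; omega
  rw [PySem.List.slice_from _ hk]
  rw [List.drop_append_of_le_length
    (by simp only [List.length_append, List.length_replicate, List.length_reverse]; omega)]
  simp only [List.length_append, List.length_replicate, List.length_reverse,
    List.take_replicate, List.drop_replicate, Nat.sub_self, List.replicate_zero, List.append_nil]
  congr 2
  omega

-- ===== VERDICT =====
theorem convert_decimal_number_to_custom_base_spec : Claim_unchanged_convert_decimal_number_to_custom_base := by
  intro n b wl hdom hpre hnd
  simp only [Dom_convert_decimal_number_to_custom_base, pvDomInt, Bool.and_eq_true,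
    decide_eq_true_eq] at hdom
  unfold D_convert_decimal_number_to_custom_base at hnd
  by_cases h0 : n = 0
  · subst h0
    simp only [convert_decimal_number_to_custom_base, convert_decimal_number_to_custom_base_alt,
      pvLoopA_zero, pvToDigits_zero, List.append_nil]
    rw [PySem.List.slice_from _ (by simp only [List.length_replicate]; omega)]
    simp only [List.drop_replicate]
    congr 1
    simp only [List.length_replicate]
    omega
  · have hn31 : n ≤ 2147483648 := hdom.1.1.2
    have hn31' : -2147483648 ≤ n := hdom.1.1.1
    rcases hpre with rfl | ⟨hb, hn, hfit⟩ | ⟨hb, hfit⟩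
    · exact absurd rfl h0
    · -- positive base
      rcases le_or_gt 34 wl with h34 | h34
      · have hpow : n < b ^ (34:Nat) := by
          calc n ≤ 2147483648 := hn31
          _ < 2 ^ (34:Nat) := by norm_num
          _ ≤ b ^ (34:Nat) := pow_le_pow_left₀ (by norm_num) hb 34
        have hlen := digitsB_len_le_pow 34 64 n b hb (by omega) hpow
        exact agree_of_len_le n b wl (by omega) (by omega)
      · have hpow : n < b ^ wl.toNat := by
          by_contra hge
          push_neg at hge
          refine hnd ⟨by omega, ?_⟩
          rw [if_pos (show (0:Int) ≤ b by omega)]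
          exact hge
        have hlen := digitsB_len_le_pow wl.toNat 64 n b hb (by omega) hpow
        have hwl1 : 1 ≤ wl := by
          by_contra hw
          push_neg at hw
          have : wl.toNat = 0 := by omega
          rw [this] at hpow
          simp at hpow
          omega
        exact agree_of_len_le n b wl hwl1 (by omega)
    · -- negative base
      rcases le_or_gt 34 wl with h34 | h34
      · have hg := pvNB_growth b hb 17
        norm_num at hg
        obtain ⟨_, _, hlo, hhi⟩ := hg
        have hlen := digitsB_len_le_nb 34 64 n b hb (by omega) (by omega)
        exact agree_of_len_le n b wl (by omega) (by omega)
      · have hsmall : (b.natAbs + 1) * n.natAbs ≤ b.natAbs ^ wl.toNat := by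
          by_contra hgt
          push_neg at hgt
          refine hnd ⟨by omega, ?_⟩
          rw [if_neg (show ¬ (0:Int) ≤ b by omega)]
          exact hgt
        have hint := fits_of_small n b wl.toNat hb hsmall
        have hlen := digitsB_len_le_nb wl.toNat 64 n b hb hint.1 hint.2
        have hwl1 : 1 ≤ wl := by
          by_contra hw
          push_neg at hw
          have hz : wl.toNat = 0 := by omega
          rw [hz] at hint
          simp [pvNB] at hint
          omega
        exact agree_of_len_le n b wl hwl1 (by omega)

theorem convert_decimal_number_to_custom_base_changed : Claim_changed_convert_decimal_number_to_custom_base := by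
  unfold Claim_changed_convert_decimal_number_to_custom_base; decide
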